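-- pv_equiv track=rewrite | github.com/KimJinYounga/Algorithm_python-2019- | Greedy/intern or contest.py | solution
-- ===== SOURCE A (Python) =====
-- def solution(N,M,K):
--     for i in range(K):
--         if N > M * 2:
--             N -= 1
--         else:
--             M -= 1
--     result = M
--
--     # 2 3 1  의 경우 ( for문을 다 돌았지만 result를 M으로 잡기에 문제가 있을 경우 )
--     if N < M * 2:
--         result = int(N / 2)
--     # 여학생은 무조건 2명 이상
--     if N<2:
--         result=0
--     return result
-- ===== SOURCE B (Python) =====
-- def solution(N, M, K):
--     # Phase 1: while N > 2*M, steps decrement N; consume up to N-2*M steps at once.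
--     d1 = min(K, N - 2 * M)
--     if d1 < 0:
--         d1 = 0
--     N -= d1
--     K -= d1
--     if K > 0:
--         # Phase 2: now N <= 2*M; steps decrement M while M >= ceil(N/2).
--         d2 = min(K, M - (N + 1) // 2 + 1)
--         M -= d2
--         K -= d2
--         if K > 0:
--             # Now 2*M < N <= 2*M + 2: the dynamics is 3-periodic, each cycle
--             # takes (N, M) to (N - 2, M - 1) with the same shape.
--             q, r = divmod(K, 3)
--             N -= 2 * q
--             M -= q
--             if r >= 1:
--                 if N > 2 * M:
--                     N -= 1
--                 else:
--                     M -= 1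
--             if r == 2:
--                 if N > 2 * M:
--                     N -= 1
--                 else:
--                     M -= 1
--     result = M
--     if N < 2 * M:
--         result = int(N / 2)
--     if N < 2:
--         result = 0
--     return result
-- ===== Notes on version B (the rewrite author's own statement) =====
-- stated objective: faster
-- what changed: Replaces the O(K) step-by-step loop with O(1) closed-form phase arithmetic: bulk-consume the N-decrement phase, then the M-decrement phase, then use the 3-step equilibrium cycle (N,M) -> (N-2,M-1) via div/mod 3, applying at most 2 remaining steps explicitly.
import Mathlib
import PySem

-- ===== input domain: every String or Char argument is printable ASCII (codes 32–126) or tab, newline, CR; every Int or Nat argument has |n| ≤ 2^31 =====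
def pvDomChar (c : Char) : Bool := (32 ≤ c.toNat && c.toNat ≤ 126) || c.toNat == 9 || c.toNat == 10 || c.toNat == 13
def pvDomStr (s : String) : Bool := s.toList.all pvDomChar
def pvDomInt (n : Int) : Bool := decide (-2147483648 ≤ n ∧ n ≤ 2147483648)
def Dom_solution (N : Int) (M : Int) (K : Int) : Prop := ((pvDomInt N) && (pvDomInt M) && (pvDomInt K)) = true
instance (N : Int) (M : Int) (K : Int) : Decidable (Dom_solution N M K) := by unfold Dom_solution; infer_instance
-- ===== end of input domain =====

-- B replaces A's O(K) step-by-step simulation by O(1) closed-form phase arithmetic; same return value.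

-- one iteration of the Python loop body: decrement N if N > M*2, else decrement M
def pvStep (s : Int × Int) : Int × Int := if s.1 > s.2 * 2 then (s.1 - 1, s.2) else (s.1, s.2 - 1)

-- ===== PORT A =====
def solution (N : Int) (M : Int) (K : Int) : Int :=
  let p := (PySem.List.pyRange 0 K 1).foldl (fun (s : Int × Int) _ => pvStep s) (N, M)
  let result := p.2
  let result := if p.1 < p.2 * 2 then Int.tdiv p.1 2 else result  -- int(N / 2): truncation
  if p.1 < 2 then 0 else result

-- ===== PORT B =====
-- closed-form computation of the loop's final (N, M)
def pvPhase (N : Int) (M : Int) (K : Int) : Int × Int :=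
  let d0 := min K (N - 2 * M)
  let d1 := if d0 < 0 then 0 else d0
  let N1 := N - d1
  let K1 := K - d1
  if K1 > 0 then
    let d2 := min K1 (M - PySem.Int.floordiv (N1 + 1) 2 + 1)
    let M2 := M - d2
    let K2 := K1 - d2
    if K2 > 0 then
      let q := PySem.Int.floordiv K2 3
      let r := PySem.Int.mod K2 3
      let N3 := N1 - 2 * q
      let M3 := M2 - q
      let s1 := if r ≥ 1 then pvStep (N3, M3) else (N3, M3)
      if r = 2 then pvStep s1 else s1
    else (N1, M2)
  else (N1, M)

def solution_alt (N : Int) (M : Int) (K : Int) : Int :=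
  let p := pvPhase N M K
  let result := p.2
  let result := if p.1 < p.2 * 2 then Int.tdiv p.1 2 else result  -- int(N / 2): truncation
  if p.1 < 2 then 0 else result

-- ===== PRECONDITION & SPEC =====
def Spec_solution (N : Int) (M : Int) (K : Int) (out : Int) : Prop := out = solution_alt N M K
instance (N : Int) (M : Int) (K : Int) (out : Int) : Decidable (Spec_solution N M K out) := by unfold Spec_solution; infer_instance

-- ===== CLAIM (what is proved, stated in full; the proofs are below) =====
def Claim_equal_solution : Prop := ∀ (N : Int) (M : Int) (K : Int), Dom_solution N M K → Spec_solution N M K (solution N M K)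

-- ===== LEMMAS AND PROOFS =====

lemma pv_foldl_step (l : List Int) (s : Int × Int) :
    l.foldl (fun (s : Int × Int) _ => pvStep s) s = pvStep^[l.length] s := by
  induction l generalizing s with
  | nil => rfl
  | cons a t ih => simp [ih, Function.iterate_succ_apply]

-- phase 1: while N > 2*M each step decrements N
lemma pv_phase1 (d : Nat) : ∀ (N M : Int), (d : Int) ≤ N - 2 * M →
    pvStep^[d] (N, M) = (N - d, M) := by
  induction d with
  | zero => intro N M _; simp
  | succ e ih =>
      intro N M h
      rw [Function.iterate_succ_apply]
      have hs : pvStep (N, M) = (N - 1, M) := by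
        simp only [pvStep]; rw [if_pos (by push_cast at h ⊢; omega)]
      rw [hs, ih (N - 1) M (by push_cast at h ⊢; omega)]
      exact congrArg₂ Prod.mk (by push_cast; ring) rfl

-- phase 2: while N ≤ 2*M each step decrements M
lemma pv_phase2 (d : Nat) : ∀ (N M : Int), N ≤ 2 * (M - d) + 2 →
    pvStep^[d] (N, M) = (N, M - d) := by
  induction d with
  | zero => intro N M _; simp
  | succ e ih =>
      intro N M h
      rw [Function.iterate_succ_apply]
      have hs : pvStep (N, M) = (N, M - 1) := by
        simp only [pvStep]; rw [if_neg (by push_cast at h ⊢; omega)]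
      rw [hs, ih N (M - 1) (by push_cast at h ⊢; omega)]
      exact congrArg₂ Prod.mk rfl (by push_cast; ring)

-- equilibrium: when 2*M < N ≤ 2*M + 2, three steps take (N, M) to (N-2, M-1)
lemma pv_cycle (N M : Int) (h1 : 2 * M < N) (h2 : N ≤ 2 * M + 2) :
    pvStep^[3] (N, M) = (N - 2, M - 1) := by
  have hc : N = 2 * M + 1 ∨ N = 2 * M + 2 := by omega
  show pvStep (pvStep (pvStep (N, M))) = (N - 2, M - 1)
  rcases hc with h | h <;> subst h
  · rw [show pvStep (2 * M + 1, M) = (2 * M, M) from by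
        simp only [pvStep]; rw [if_pos (by omega)]; exact congrArg₂ Prod.mk (by ring) rfl,
      show pvStep (2 * M, M) = (2 * M, M - 1) from by
        simp only [pvStep]; rw [if_neg (by omega)],
      show pvStep (2 * M, M - 1) = (2 * M - 1, M - 1) from by
        simp only [pvStep]; rw [if_pos (by omega)]]
    exact congrArg₂ Prod.mk (by ring) rfl
  · rw [show pvStep (2 * M + 2, M) = (2 * M + 1, M) from by
        simp only [pvStep]; rw [if_pos (by omega)]; exact congrArg₂ Prod.mk (by ring) rfl,
      show pvStep (2 * M + 1, M) = (2 * M, M) from by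
        simp only [pvStep]; rw [if_pos (by omega)]; exact congrArg₂ Prod.mk (by ring) rfl,
      show pvStep (2 * M, M) = (2 * M, M - 1) from by
        simp only [pvStep]; rw [if_neg (by omega)]]
    exact congrArg₂ Prod.mk (by ring) rfl

lemma pv_cycles (q : Nat) : ∀ (N M : Int), 2 * M < N → N ≤ 2 * M + 2 →
    pvStep^[3 * q] (N, M) = (N - 2 * q, M - q) := by
  induction q with
  | zero => intro N M _ _; simp
  | succ e ih =>
      intro N M h1 h2
      have : 3 * (e + 1) = 3 * e + 3 := by omega
      rw [this, Function.iterate_add_apply, pv_cycle N M h1 h2,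
        ih (N - 2) (M - 1) (by omega) (by omega)]
      exact congrArg₂ Prod.mk (by push_cast; ring) (by push_cast; ring)

-- the core: the closed form equals K iterations of the loop body
lemma pv_phase_eq (N M K : Int) : pvPhase N M K = pvStep^[K.toNat] (N, M) := by
  simp only [pvPhase,
    show ∀ a : Int, PySem.Int.floordiv a 2 = a / 2 from fun a =>
      PySem.Int.floordiv_eq_ediv_of_pos (by norm_num),
    show ∀ a : Int, PySem.Int.floordiv a 3 = a / 3 from fun a =>
      PySem.Int.floordiv_eq_ediv_of_pos (by norm_num),
    show ∀ a : Int, PySem.Int.mod a 3 = a % 3 from fun a =>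
      PySem.Int.mod_eq_emod_of_pos (by norm_num)]
  set d0 := min K (N - 2 * M) with hd0
  set d1 := if d0 < 0 then 0 else d0 with hd1
  have hd1n : 0 ≤ d1 := by rw [hd1]; split <;> omega
  have hstep1 : pvStep^[d1.toNat] (N, M) = (N - d1, M) := by
    by_cases h : d0 < 0
    · have h1 : d1 = 0 := by rw [hd1, if_pos h]
      rw [h1]; simp
    · have h1 : d1 = d0 := by rw [hd1, if_neg h]
      have h2 : (d1.toNat : Int) = d1 := by omega
      rw [pv_phase1 d1.toNat N M (by omega), h2]
  by_cases hK1 : K - d1 > 0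
  · rw [if_pos hK1]
    have hsplit : K.toNat = (K - d1).toNat + d1.toNat := by omega
    rw [hsplit, Function.iterate_add_apply, hstep1]
    have hN1 : N - d1 ≤ 2 * M := by
      rw [hd1]; split <;> omega
    set N1 := N - d1 with hN1d
    set K1 := K - d1 with hK1d
    have hf : 2 * ((N1 + 1) / 2) ≤ N1 + 1 ∧ N1 ≤ 2 * ((N1 + 1) / 2) := by omega
    set c := M - (N1 + 1) / 2 + 1 with hc
    have hc1 : 1 ≤ c := by omega
    set d2 := min K1 c with hd2
    have hstep2 : pvStep^[d2.toNat] (N1, M) = (N1, M - d2) := by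
      have := pv_phase2 d2.toNat N1 M (by omega)
      rw [this]
      exact congrArg₂ Prod.mk rfl (by omega)
    by_cases hK2 : K1 - d2 > 0
    · rw [if_pos hK2]
      set M2 := M - d2 with hM2
      have hd2c : d2 = c := by omega
      have hshape : 2 * M2 < N1 ∧ N1 ≤ 2 * M2 + 2 := by omega
      set K2 := K1 - d2 with hK2d
      set q := K2 / 3 with hq
      set r := K2 % 3 with hr
      have hqr : K2 = 3 * q + r ∧ 0 ≤ r ∧ r < 3 ∧ 0 ≤ q := by
        constructor; · omega
        constructor; · omega
        constructor; · omega
        · omega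
      have hsplitK1 : K1.toNat = (K1 - d2).toNat + d2.toNat := by omega
      rw [hsplitK1, Function.iterate_add_apply, hstep2]
      have hsplitK2 : (K1 - d2).toNat = r.toNat + 3 * q.toNat := by omega
      rw [hsplitK2, Function.iterate_add_apply,
        pv_cycles q.toNat N1 M2 hshape.1 hshape.2]
      have hcast : (N1 - 2 * (q.toNat : Int), M2 - (q.toNat : Int)) = (N1 - 2 * q, M2 - q) :=
        congrArg₂ Prod.mk (by omega) (by omega)
      rw [hcast]
      have hr3 : r = 0 ∨ r = 1 ∨ r = 2 := by omega
      rcases hr3 with h | h | h <;> rw [h]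
      · norm_num
      · norm_num
      · norm_num
        rfl
    · rw [if_neg hK2]
      have hd2K : d2 = K1 := by omega
      rw [← hd2K]
      exact hstep2.symm
  · rw [if_neg hK1]
    by_cases hKpos : 0 < K
    · have hd1K : d1 = K := by rw [hd1]; split <;> omega
      have : K.toNat = d1.toNat := by omega
      rw [this, hstep1]
    · have hd1z : d1 = 0 := by rw [hd1]; split <;> omega
      have : K.toNat = 0 := by omega
      rw [this]
      exact congrArg₂ Prod.mk (by omega) rfl

-- ===== VERDICT (by name: the statement is the Claim_ definition above) =====
theorem solution_spec : Claim_equal_solution := by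
  intro N M K _
  unfold Spec_solution solution solution_alt
  rw [pv_foldl_step, PySem.List.length_pyRange_one, pv_phase_eq]
  norm_num
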